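-- pv_equiv track=rewrite | github.com/Simioniuc-Ionut/GUI_HTTP_Sniffer-Python | sniffest_service.py | find_http_request_type
-- ===== SOURCE A (Python) =====
-- def find_http_request_type(decoded_data):
--     start_index = -1
--     for i in range(len(decoded_data)):
--         if decoded_data[i:i+3] in ('GET', 'POS', 'HEA', 'PUT', 'DEL', 'OPT', 'PAT'):
--             start_index = i
--             break
--     if start_index == -1:
--         raise ValueError("Failed to find a valid HTTP request line")
--
--     # Extract the valid HTTP data starting from the Request Line
--     valid_http_data = decoded_data[start_index:]
--     return valid_http_data
-- ===== SOURCE B (Python) =====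
-- def find_http_request_type(decoded_data):
--     methods = ('GET', 'POS', 'HEA', 'PUT', 'DEL', 'OPT', 'PAT')
--     valid = [idx for idx in (decoded_data.find(m) for m in methods) if idx >= 0]
--     if not valid:
--         raise ValueError("Failed to find a valid HTTP request line")
--     return decoded_data[min(valid):]
-- ===== Notes on version B (the rewrite author's own statement) =====
-- stated objective: simpler
-- what changed: Replaces the Python-level index loop that slices and tests 3-char windows with one str.find per method prefix, keeping the minimum non-negative hit and slicing there; both raise the same ValueError when no prefix occurs.
import Mathlib
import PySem

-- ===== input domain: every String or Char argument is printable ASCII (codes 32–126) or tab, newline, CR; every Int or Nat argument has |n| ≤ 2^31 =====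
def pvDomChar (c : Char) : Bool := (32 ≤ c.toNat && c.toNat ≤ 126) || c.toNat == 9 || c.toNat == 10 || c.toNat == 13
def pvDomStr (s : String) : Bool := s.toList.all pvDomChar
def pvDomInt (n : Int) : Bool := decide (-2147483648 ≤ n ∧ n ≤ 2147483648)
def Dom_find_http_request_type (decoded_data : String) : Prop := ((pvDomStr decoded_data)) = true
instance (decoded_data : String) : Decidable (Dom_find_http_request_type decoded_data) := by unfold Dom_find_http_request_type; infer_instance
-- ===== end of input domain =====

-- B replaces A's per-index window scan with one find per method prefix reduced by min (simpler).
-- Strings are handled as code-point lists (exact for ASCII slicing/equality).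

-- ===== PORT A =====
-- the tuple ('GET', 'POS', 'HEA', 'PUT', 'DEL', 'OPT', 'PAT')
def pvMethods : List (List Char) :=
  [['G','E','T'], ['P','O','S'], ['H','E','A'], ['P','U','T'], ['D','E','L'], ['O','P','T'], ['P','A','T']]

-- the `for i in range(len(decoded_data))` loop with its break; returns start_index (-1 if no break)
def pvLoopA (l : List Char) (i : Nat) : Int :=
  if h : i < l.length then
    if PySem.List.slice l (some (i : Int)) (some ((i : Int) + 3)) ∈ pvMethods then (i : Int)
    else pvLoopA l (i + 1)
  else -1
termination_by l.length - i

def find_http_request_type (decoded_data : String) : String :=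
  let start_index := pvLoopA decoded_data.toList 0
  if start_index = -1 then ""    -- Python raises ValueError here (excluded by Pre_)
  else String.ofList (PySem.List.slice decoded_data.toList (some start_index) none)

-- ===== PORT B =====
def find_http_request_type_alt (decoded_data : String) : String :=
  let valid := (pvMethods.map (fun m => PySem.Chars.find decoded_data.toList m)).filter
      (fun idx => decide (0 ≤ idx))
  match PySem.List.min? valid (fun x => x) with
  | none => ""    -- Python raises ValueError here (excluded by Pre_)
  | some m => String.ofList (PySem.List.slice decoded_data.toList (some m) none)

-- ===== PRECONDITION & SPEC =====
-- Pre_ excludes exactly the inputs containing no HTTP method prefix, on which A raises ValueError.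
def Pre_find_http_request_type (decoded_data : String) : Prop :=
  ∃ m ∈ pvMethods, PySem.Chars.isIn m decoded_data.toList = true
instance (decoded_data : String) : Decidable (Pre_find_http_request_type decoded_data) := by
  unfold Pre_find_http_request_type; infer_instance

def pvWitness_find_http_request_type : String := "GET / HTTP/1.1\r\n"

def Spec_find_http_request_type (decoded_data : String) (out : String) : Prop :=
  out = find_http_request_type_alt decoded_data
instance (decoded_data : String) (out : String) :
    Decidable (Spec_find_http_request_type decoded_data out) := by
  unfold Spec_find_http_request_type; infer_instance

-- ===== CLAIM =====
def Claim_equal_find_http_request_type : Prop :=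
  ∀ (decoded_data : String), Dom_find_http_request_type decoded_data →
    Pre_find_http_request_type decoded_data →
    Spec_find_http_request_type decoded_data (find_http_request_type decoded_data)

-- ===== LEMMAS AND PROOFS =====

-- some method prefix matches at position j
def pvHit (l : List Char) (j : Nat) : Prop := ∃ p ∈ pvMethods, p <+: l.drop j

theorem pvMethods_len : ∀ p ∈ pvMethods, p.length = 3 := by decide

theorem pvTake_eq_iff (p x : List Char) (hp : p.length = 3) : x.take 3 = p ↔ p <+: x := by
  rw [List.prefix_iff_eq_take, hp, eq_comm]

theorem pvSlice_mem_iff (l : List Char) (i : Nat) :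
    (PySem.List.slice l (some (i : Int)) (some ((i : Int) + 3)) ∈ pvMethods) ↔ pvHit l i := by
  have h3 : ((i : Int) + 3) = ((i : Int) + ((3 : Nat) : Int)) := by norm_num
  rw [h3, PySem.List.slice_natCast_add]
  constructor
  · intro h
    exact ⟨_, h, (pvTake_eq_iff _ _ (pvMethods_len _ h)).1 rfl⟩
  · rintro ⟨p, hp, hpre⟩
    have := (pvTake_eq_iff p (l.drop i) (pvMethods_len p hp)).2 hpre
    rw [this]; exact hp

theorem pvHit_lt (l : List Char) (j : Nat) (h : pvHit l j) : j < l.length := by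
  obtain ⟨p, hp, hpre⟩ := h
  have h3 : p.length = 3 := pvMethods_len p hp
  have := hpre.length_le
  simp only [List.length_drop] at this
  omega

theorem pvLoopA_finds (l : List Char) (i : Nat) (h : ∃ j, i ≤ j ∧ pvHit l j) :
    ∃ k : Nat, pvLoopA l i = (k : Int) ∧ pvHit l k ∧ i ≤ k ∧
      ∀ j, i ≤ j → j < k → ¬ pvHit l j := by
  obtain ⟨j, hij, hj⟩ := h
  have hjlen : j < l.length := pvHit_lt l j hj
  have hilen : i < l.length := by omega
  rw [pvLoopA, dif_pos hilen]
  by_cases hs : PySem.List.slice l (some (i : Int)) (some ((i : Int) + 3)) ∈ pvMethods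
  · rw [if_pos hs]
    exact ⟨i, rfl, (pvSlice_mem_iff l i).1 hs, le_refl i, fun j h1 h2 _ => by omega⟩
  · rw [if_neg hs]
    have hni : ¬ pvHit l i := fun hh => hs ((pvSlice_mem_iff l i).2 hh)
    have hij' : i + 1 ≤ j := by
      rcases Nat.eq_or_lt_of_le hij with rfl | h'
      · exact absurd hj hni
      · omega
    obtain ⟨k, hk, hhit, hik, hmin⟩ := pvLoopA_finds l (i + 1) ⟨j, hij', hj⟩
    refine ⟨k, hk, hhit, by omega, fun j' h1 h2 => ?_⟩
    rcases Nat.eq_or_lt_of_le h1 with rfl | h'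
    · exact hni
    · exact hmin j' h' h2
termination_by l.length - i
decreasing_by omega

theorem pvAlt_min (l : List Char) (i₀ : Nat) (hhit : pvHit l i₀)
    (hmin : ∀ j, j < i₀ → ¬ pvHit l j) :
    PySem.List.min?
      ((pvMethods.map (fun m => PySem.Chars.find l m)).filter (fun idx => decide (0 ≤ idx)))
      (fun x => x) = some ((i₀ : Nat) : Int) := by
  set valid := (pvMethods.map (fun m => PySem.Chars.find l m)).filter
      (fun idx => decide (0 ≤ idx)) with hvalid
  obtain ⟨p, hp, hpre⟩ := hhit
  -- the find of the witnessing prefix equals i₀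
  have hinf : p <:+: l := hpre.isInfix.trans (l.drop_suffix i₀).isInfix
  have h0 : 0 ≤ PySem.Chars.find l p := (PySem.Chars.find_nonneg_iff l p).2 hinf
  obtain ⟨hfp, hfmin⟩ := PySem.Chars.find_spec h0
  have hle : (PySem.Chars.find l p).toNat ≤ i₀ := by
    by_contra hlt
    exact hfmin i₀ (by omega) hpre
  have hge : i₀ ≤ (PySem.Chars.find l p).toNat := by
    by_contra hlt
    exact hmin _ (by omega) ⟨p, hp, hfp⟩
  have hfi : PySem.Chars.find l p = ((i₀ : Nat) : Int) := by omega
  have hmem : ((i₀ : Nat) : Int) ∈ valid := by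
    rw [hvalid]
    refine List.mem_filter.2 ⟨List.mem_map.2 ⟨p, hp, hfi⟩, by simp⟩
  -- every valid find is ≥ i₀
  have hlb : ∀ y ∈ valid, ((i₀ : Nat) : Int) ≤ y := by
    intro y hy
    obtain ⟨hymap, hy0⟩ := List.mem_filter.1 hy
    obtain ⟨q, hq, hqy⟩ := List.mem_map.1 hymap
    have hy0' : 0 ≤ y := by simpa using hy0
    obtain ⟨hqp, _⟩ := PySem.Chars.find_spec (hqy ▸ hy0')
    have hhy : pvHit l (PySem.Chars.find l q).toNat := ⟨q, hq, hqp⟩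
    have : i₀ ≤ (PySem.Chars.find l q).toNat := by
      by_contra hlt
      exact hmin _ (by omega) hhy
    omega
  cases hm : PySem.List.min? valid (fun x => x) with
  | none =>
      rw [PySem.List.min?_eq_none_iff] at hm
      rw [hm] at hmem
      exact absurd hmem (List.not_mem_nil)
  | some m =>
      have h1 : ((i₀ : Nat) : Int) ≤ m := hlb m (PySem.List.min?_mem hm)
      have h2 : m ≤ ((i₀ : Nat) : Int) := PySem.List.min?_isMin hm _ hmem
      rw [le_antisymm h2 h1]

-- ===== VERDICT =====
theorem find_http_request_type_spec : Claim_equal_find_http_request_type := by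
  intro s _ hpre
  unfold Spec_find_http_request_type
  obtain ⟨p, hp, hin⟩ := hpre
  obtain ⟨j, hj⟩ := (PySem.Chars.exists_prefix_drop_iff_isIn p s.toList).2 hin
  obtain ⟨k, hk, hhit, -, hmin⟩ :=
    pvLoopA_finds s.toList 0 ⟨j, Nat.zero_le j, ⟨p, hp, hj⟩⟩
  have hmin' : ∀ j', j' < k → ¬ pvHit s.toList j' := fun j' h => hmin j' (Nat.zero_le j') h
  have hB := pvAlt_min s.toList k hhit hmin'
  unfold find_http_request_type find_http_request_type_alt
  simp only [hk, hB]
  rw [if_neg (by omega)]
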